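-- pv_equiv track=rewrite | github.com/falsednk/a_hockey | app/src/clear_game.py | get_index_for_game
-- ===== SOURCE A (Python) =====
-- def get_index_for_game(info_list: list, advertising=1) -> list:
--     """prepares indexes for video description"""
--     last_value = info_list[0][-1]
--     x = info_list[0][1]
--     coord = []
--     for i in range(len(info_list)):
--         if info_list[i][-1] != last_value or i == len(info_list) - 1:
--             y = info_list[i][1]
--             coord.append([last_value, x, y])
--             x, last_value = y, info_list[i][-1]
--     game_coord = list(filter(lambda x_: x_[0] == advertising, coord))
--     return game_coord
-- ===== SOURCE B (Python) =====
-- def get_index_for_game(info_list: list, advertising=1) -> list: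
--     """prepares indexes for video description"""
--     n = len(info_list)
--     values = [row[-1] for row in info_list]
--     # cut indices: every position where the value changes, and the final index
--     cuts = [i for i in range(1, n) if values[i] != values[i - 1]]
--     if not cuts or cuts[-1] != n - 1:
--         cuts.append(n - 1)
--     segs = []
--     prev = 0
--     for c in cuts:
--         value = values[c - 1] if c > 0 else values[0]
--         segs.append([value, info_list[prev][1], info_list[c][1]])
--         prev = c
--     return [s for s in segs if s[0] == advertising]
-- ===== Notes on version B (the rewrite author's own statement) =====
-- stated objective: alternative
-- what changed: B first computes the list of cut indices (every position where the trailing value changes, plus the final index) and then maps consecutive cut pairs to [value, start_coord, end_coord] segments, replacing A's single stateful loop that threads (x, last_value) through every row; Pre_ excludes only inputs where A raises IndexError (empty list, empty rows, rows missing index 1 at accessed positions).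
import Mathlib
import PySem

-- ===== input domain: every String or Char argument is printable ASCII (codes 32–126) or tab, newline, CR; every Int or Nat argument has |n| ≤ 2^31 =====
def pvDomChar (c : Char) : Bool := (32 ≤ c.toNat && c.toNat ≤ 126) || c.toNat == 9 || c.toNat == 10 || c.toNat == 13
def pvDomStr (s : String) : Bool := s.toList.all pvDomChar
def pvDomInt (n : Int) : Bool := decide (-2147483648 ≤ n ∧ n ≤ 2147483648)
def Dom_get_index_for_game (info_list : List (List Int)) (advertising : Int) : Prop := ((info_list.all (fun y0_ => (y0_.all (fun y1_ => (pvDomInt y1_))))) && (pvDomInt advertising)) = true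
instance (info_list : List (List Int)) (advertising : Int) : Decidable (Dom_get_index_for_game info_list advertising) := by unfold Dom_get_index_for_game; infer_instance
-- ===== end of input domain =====

-- B computes the list of cut indices (value changes plus the final index) and maps consecutive cut pairs to segments; alternative decomposition, same cost.

-- ===== PORT A =====
-- loop body of A's for-loop, as a named helper (literal transliteration of the body)
def pvStepA (L : List (List Int)) (s : Int × Int × List (List Int)) (i : Int) : Int × Int × List (List Int) :=
  let row := PySem.List.pyGetD L i []
  let v := PySem.List.pyGetD row (-1) 0
  if v ≠ s.2.1 ∨ i = (L.length : Int) - 1 then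
    let y := PySem.List.pyGetD row 1 0
    (y, v, s.2.2 ++ [[s.2.1, s.1, y]])
  else s

def get_index_for_game (info_list : List (List Int)) (advertising : Int) : List (List Int) :=
  let row0 := PySem.List.pyGetD info_list 0 []
  let last_value := PySem.List.pyGetD row0 (-1) 0
  let x := PySem.List.pyGetD row0 1 0
  let st := (PySem.List.pyRange 0 (info_list.length : Int) 1).foldl (pvStepA info_list) (x, last_value, ([] : List (List Int)))
  st.2.2.filter (fun x_ => PySem.List.pyGetD x_ 0 0 = advertising)

-- ===== PORT B =====
-- body of Source B's `for c in cuts` loop: state = (segs, prev)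
def pvStepB (info_list : List (List Int)) (values : List Int) (st : List (List Int) × Int) (c : Int) : List (List Int) × Int :=
  let value := if 0 < c then PySem.List.pyGetD values (c - 1) 0 else PySem.List.pyGetD values 0 0
  (st.1 ++ [[value, PySem.List.pyGetD (PySem.List.pyGetD info_list st.2 []) 1 0,
             PySem.List.pyGetD (PySem.List.pyGetD info_list c []) 1 0]], c)

def get_index_for_game_alt (info_list : List (List Int)) (advertising : Int) : List (List Int) :=
  let n : Int := (info_list.length : Int)
  let values := info_list.map (fun r => PySem.List.pyGetD r (-1) 0)
  let cuts0 := (PySem.List.pyRange 1 n 1).filter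
      (fun i => PySem.List.pyGetD values i 0 ≠ PySem.List.pyGetD values (i - 1) 0)
  let cuts := if cuts0 = [] ∨ PySem.List.pyGet? cuts0 (-1) ≠ some (n - 1) then cuts0 ++ [n - 1] else cuts0
  let st := cuts.foldl (pvStepB info_list values) ([], 0)
  st.1.filter (fun s => PySem.List.pyGetD s 0 0 = advertising)

-- ===== PRECONDITION & SPEC =====
-- Pre_ holds exactly where Python A returns normally: A raises IndexError on the empty list, on any
-- fully-empty row (row[-1]), and whenever row[1] is taken of a too-short row (row 0, the last row,
-- and every row whose last element differs from its predecessor's).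
def Pre_get_index_for_game (info_list : List (List Int)) (advertising : Int) : Prop :=
  info_list ≠ [] ∧ 2 ≤ (info_list.headD []).length ∧ (∀ r ∈ info_list, r ≠ []) ∧
  2 ≤ (info_list.getLastD []).length ∧
  ∀ i : Nat, i < info_list.length → 0 < i →
    (info_list.getD i []).getLastD 0 ≠ (info_list.getD (i - 1) []).getLastD 0 →
    2 ≤ (info_list.getD i []).length
instance (info_list : List (List Int)) (advertising : Int) : Decidable (Pre_get_index_for_game info_list advertising) := by
  unfold Pre_get_index_for_game; infer_instance

def pvWitness_get_index_for_game : List (List Int) × Int := ([[1, 2], [3, 4]], 1)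

def Spec_get_index_for_game (info_list : List (List Int)) (advertising : Int) (out : List (List Int)) : Prop := out = get_index_for_game_alt info_list advertising
instance (info_list : List (List Int)) (advertising : Int) (out : List (List Int)) : Decidable (Spec_get_index_for_game info_list advertising out) := by unfold Spec_get_index_for_game; infer_instance

-- ===== CLAIM (what is proved, stated in full; the proofs are below) =====
def Claim_equal_get_index_for_game : Prop := ∀ (info_list : List (List Int)) (advertising : Int), Dom_get_index_for_game info_list advertising → Pre_get_index_for_game info_list advertising → Spec_get_index_for_game info_list advertising (get_index_for_game info_list advertising)

-- ===== LEMMAS AND PROOFS =====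

-- value (row[-1]) and coordinate (row[1]) at a Nat index
def pvVi (L : List (List Int)) (i : Nat) : Int := PySem.List.pyGetD (L.getD i []) (-1) 0
def pvCi (L : List (List Int)) (i : Nat) : Int := PySem.List.pyGetD (L.getD i []) 1 0

-- change indices in [k, k+m)
def pvChanges (L : List (List Int)) (k m : Nat) : List Nat :=
  (List.range' k m).filter (fun i => decide (pvVi L i ≠ pvVi L (i - 1)))

-- cut indices from k on: changes, plus the final index if absent
def pvCutsFrom (L : List (List Int)) (k : Nat) : List Nat :=
  if (pvChanges L k (L.length - k)).getLast? = some (L.length - 1) then pvChanges L k (L.length - k)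
  else pvChanges L k (L.length - k) ++ [L.length - 1]

-- segments from a cut list, threading the start coordinate
def pvG (L : List (List Int)) : Int → List Nat → List (List Int)
  | _, [] => []
  | x, c :: cs => [pvVi L (c - 1), x, pvCi L c] :: pvG L (pvCi L c) cs

-- A's loop as a structural recursion on the remaining suffix (full state)
def pvStateA : Int → Int → List (List Int) → List (List Int) → Int × Int × List (List Int)
  | x, lv, acc, [] => (x, lv, acc)
  | x, lv, acc, r :: rs =>
    if PySem.List.pyGetD r (-1) 0 ≠ lv ∨ rs = [] then
      pvStateA (PySem.List.pyGetD r 1 0) (PySem.List.pyGetD r (-1) 0)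
        (acc ++ [[lv, x, PySem.List.pyGetD r 1 0]]) rs
    else pvStateA x lv acc rs

-- just the emitted segments of A's loop
def pvSegA : Int → Int → List (List Int) → List (List Int)
  | _, _, [] => []
  | x, lv, r :: rs =>
    if PySem.List.pyGetD r (-1) 0 ≠ lv ∨ rs = [] then
      [lv, x, PySem.List.pyGetD r 1 0] :: pvSegA (PySem.List.pyGetD r 1 0) (PySem.List.pyGetD r (-1) 0) rs
    else pvSegA x lv rs

theorem pvFoldA_eq (suf : List (List Int)) : ∀ (pre : List (List Int)) (x lv : Int) (acc : List (List Int)),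
    (PySem.List.pyRange (pre.length : Int) ((pre ++ suf).length : Int) 1).foldl (pvStepA (pre ++ suf)) (x, lv, acc)
      = pvStateA x lv acc suf := by
  induction suf with
  | nil =>
    intro pre x lv acc
    rw [List.append_nil, PySem.List.pyRange_one_eq_nil (le_refl _)]
    rfl
  | cons r rs ih =>
    intro pre x lv acc
    have h1 : (pre.length : Int) < ((pre ++ r :: rs).length : Int) := by
      simp
    rw [PySem.List.pyRange_one_cons h1, List.foldl_cons]
    have hrow : PySem.List.pyGetD (pre ++ r :: rs) ((pre.length : Nat) : Int) [] = r := by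
      rw [PySem.List.pyGetD_natCast]
      simp [List.getD_eq_getElem?_getD]
    have hiff : ((pre.length : Int) = ((pre ++ r :: rs).length : Int) - 1) ↔ rs = [] := by
      simp only [List.length_append, List.length_cons]
      push_cast
      constructor
      · intro h
        have : rs.length = 0 := by omega
        exact List.length_eq_zero_iff.mp this
      · intro h; subst h; simp
    have happ : pre ++ r :: rs = (pre ++ [r]) ++ rs := by simp
    have hlen2 : (pre.length : Int) + 1 = (((pre ++ [r]).length : Nat) : Int) := by
      simp
    simp only [pvStepA, hrow]
    by_cases hc : PySem.List.pyGetD r (-1) 0 ≠ lv ∨ rs = []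
    · have hc' : PySem.List.pyGetD r (-1) 0 ≠ lv ∨ (pre.length : Int) = ((pre ++ r :: rs).length : Int) - 1 := by
        rcases hc with h | h
        · exact Or.inl h
        · exact Or.inr (hiff.mpr h)
      rw [if_pos hc']
      have := ih (pre ++ [r]) (PySem.List.pyGetD r 1 0) (PySem.List.pyGetD r (-1) 0)
        (acc ++ [[lv, x, PySem.List.pyGetD r 1 0]])
      rw [← happ, ← hlen2] at this
      rw [this]
      simp only [pvStateA, if_pos hc]
    · have hc' : ¬ (PySem.List.pyGetD r (-1) 0 ≠ lv ∨ (pre.length : Int) = ((pre ++ r :: rs).length : Int) - 1) := by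
        intro h
        rcases h with h | h
        · exact hc (Or.inl h)
        · exact hc (Or.inr (hiff.mp h))
      rw [if_neg hc']
      have := ih (pre ++ [r]) x lv acc
      rw [← happ, ← hlen2] at this
      rw [this]
      simp only [pvStateA, if_neg hc]

theorem pvStateA_segs (suf : List (List Int)) : ∀ (x lv : Int) (acc : List (List Int)),
    (pvStateA x lv acc suf).2.2 = acc ++ pvSegA x lv suf := by
  induction suf with
  | nil => intro x lv acc; simp [pvStateA, pvSegA]
  | cons r rs ih =>
    intro x lv acc
    by_cases h : PySem.List.pyGetD r (-1) 0 ≠ lv ∨ rs = []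
    · simp only [pvStateA, pvSegA, if_pos h, ih]; simp
    · simp only [pvStateA, pvSegA, if_neg h, ih]

-- values built by port B agree with pvVi at every Nat index
theorem pvValues_getD (L : List (List Int)) (j : Nat) :
    (L.map (fun r => PySem.List.pyGetD r (-1) 0)).getD j 0 = pvVi L j := by
  unfold pvVi
  by_cases h : j < L.length
  · simp [List.getD_eq_getElem?_getD, List.getElem?_eq_getElem h]
  · have h' : L.length ≤ j := le_of_not_gt h
    rw [List.getD_eq_default _ _ (by simpa using h'), List.getD_eq_default _ _ h']
    rfl

-- pyRange over Nat bounds is the cast of range'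
theorem pvRange_cast (a n : Nat) :
    PySem.List.pyRange (a : Int) (n : Int) 1 = (List.range' a (n - a)).map (fun i : Nat => (i : Int)) := by
  rw [PySem.List.pyRange_one, List.range'_eq_map_range, List.map_map]
  have ht : ((n : Int) - (a : Int)).toNat = n - a := by omega
  rw [ht]
  apply List.map_congr_left
  intro k _
  simp only [Function.comp]
  push_cast
  ring

-- port B's filtered range is the cast of pvChanges
theorem pvCuts0_eq (L : List (List Int)) :
    ((PySem.List.pyRange 1 (L.length : Int) 1).filter
        (fun i => decide (PySem.List.pyGetD (L.map (fun r => PySem.List.pyGetD r (-1) 0)) i 0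
          ≠ PySem.List.pyGetD (L.map (fun r => PySem.List.pyGetD r (-1) 0)) (i - 1) 0)))
      = (pvChanges L 1 (L.length - 1)).map (fun i : Nat => (i : Int)) := by
  have hr := pvRange_cast 1 L.length
  simp only [Nat.cast_one] at hr
  rw [hr, List.filter_map]
  unfold pvChanges
  congr 1
  apply List.filter_congr
  intro i hi
  have hi1 : 1 ≤ i := by
    have := List.mem_range'.mp hi
    omega
  have hc1 : ((i : Int) - 1) = ((i - 1 : Nat) : Int) := by omega
  simp only [Function.comp, PySem.List.pyGetD_natCast, hc1]
  rw [pvValues_getD, pvValues_getD]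

-- port B's final cut list is the cast of pvCutsFrom L 1
theorem pvCutsF_eq (L : List (List Int)) (h : L ≠ []) :
    (if (pvChanges L 1 (L.length - 1)).map (fun i : Nat => (i : Int)) = []
        ∨ PySem.List.pyGet? ((pvChanges L 1 (L.length - 1)).map (fun i : Nat => (i : Int))) (-1)
            ≠ some ((L.length : Int) - 1)
      then (pvChanges L 1 (L.length - 1)).map (fun i : Nat => (i : Int)) ++ [(L.length : Int) - 1]
      else (pvChanges L 1 (L.length - 1)).map (fun i : Nat => (i : Int)))
      = (pvCutsFrom L 1).map (fun i : Nat => (i : Int)) := by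
  have hn : 1 ≤ L.length := by
    cases L with
    | nil => exact absurd rfl h
    | cons a l => simp
  have hcast : ((L.length : Int) - 1) = ((L.length - 1 : Nat) : Int) := by omega
  set cs := pvChanges L 1 (L.length - 1) with hcs
  unfold pvCutsFrom
  rw [← hcs]
  rw [PySem.List.pyGet?_neg_one, List.getLast?_map]
  have hiff : (cs.map (fun i : Nat => (i : Int)) = []
      ∨ Option.map (fun i : Nat => (i : Int)) cs.getLast? ≠ some ((L.length : Int) - 1))
      ↔ ¬ (cs.getLast? = some (L.length - 1)) := by
    rw [hcast]
    cases hlast : cs.getLast? with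
    | none =>
      have hnil : cs = [] := List.getLast?_eq_none_iff.mp hlast
      simp [hnil]
    | some j =>
      have hne : cs ≠ [] := by intro hx; rw [hx] at hlast; simp at hlast
      simp [hne]
  by_cases hsp : cs.getLast? = some (L.length - 1)
  · rw [if_neg (fun hc => (hiff.mp hc) hsp), if_pos hsp]
  · rw [if_pos (hiff.mpr hsp), if_neg hsp, hcast]
    simp

-- port B's segment fold computes pvG
theorem pvFoldB_eq (L : List (List Int)) (cs : List Nat) : ∀ (acc : List (List Int)) (p : Nat),
    ((cs.map (fun c : Nat => (c : Int))).foldl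
        (pvStepB L (L.map (fun r => PySem.List.pyGetD r (-1) 0))) (acc, (p : Int))).1
      = acc ++ pvG L (pvCi L p) cs := by
  induction cs with
  | nil => intro acc p; simp [pvG]
  | cons c cs ih =>
    intro acc p
    rw [List.map_cons, List.foldl_cons]
    have hval : (if 0 < (c : Int)
        then PySem.List.pyGetD (L.map (fun r => PySem.List.pyGetD r (-1) 0)) ((c : Int) - 1) 0
        else PySem.List.pyGetD (L.map (fun r => PySem.List.pyGetD r (-1) 0)) 0 0) = pvVi L (c - 1) := by
      by_cases hc : 0 < c
      · rw [if_pos (by exact_mod_cast hc)]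
        have : ((c : Int) - 1) = ((c - 1 : Nat) : Int) := by omega
        rw [this, PySem.List.pyGetD_natCast, pvValues_getD]
      · have hc0 : c = 0 := by omega
        subst hc0
        rw [if_neg (by norm_num)]
        rw [PySem.List.pyGetD_zero, pvValues_getD]
    have hstep : pvStepB L (L.map (fun r => PySem.List.pyGetD r (-1) 0)) (acc, (p : Int)) (c : Int)
        = (acc ++ [[pvVi L (c - 1), pvCi L p, pvCi L c]], (c : Int)) := by
      unfold pvStepB
      simp only [hval, PySem.List.pyGetD_natCast]
      rfl
    rw [hstep, ih]
    simp [pvG]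

-- main bridge: A's emitted segments from index k equal pvG over the cuts from k
theorem pvMainB (L : List (List Int)) : ∀ (m k : Nat), 1 ≤ m → 1 ≤ k → k + m = L.length → ∀ x : Int,
    pvSegA x (pvVi L (k - 1)) (L.drop k) = pvG L x (pvCutsFrom L k) := by
  intro m
  induction m with
  | zero => intro k h1; omega
  | succ m' ih =>
    intro k _ hk hkm x
    have hklt : k < L.length := by omega
    have hdrop : L.drop k = L.getD k [] :: L.drop (k + 1) := by
      rw [List.drop_eq_getElem_cons hklt]
      congr 1
      rw [List.getD_eq_getElem?_getD, List.getElem?_eq_getElem hklt]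
      rfl
    cases Nat.eq_zero_or_pos m' with
    | inl hm0 =>
      -- k = L.length - 1 : single remaining row
      subst hm0
      have hk1 : k = L.length - 1 := by omega
      have hdropnil : L.drop (k + 1) = [] := by
        apply List.drop_eq_nil_of_le; omega
      rw [hdrop, hdropnil]
      have hA : pvSegA x (pvVi L (k - 1)) [L.getD k []]
          = [[pvVi L (k - 1), x, pvCi L k]] := by
        simp [pvSegA, pvVi, pvCi]
      rw [hA]
      have hm1 : L.length - k = 1 := by omega
      unfold pvCutsFrom pvChanges
      rw [hm1]
      have hr1 : List.range' k 1 = [k] := by simp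
      rw [hr1]
      by_cases hch : pvVi L k ≠ pvVi L (k - 1)
      · rw [List.filter_cons_of_pos (by simpa using hch)]
        simp only [List.filter_nil]
        rw [if_pos (by rw [hk1]; rfl)]
        simp [pvG, hk1]
      · rw [List.filter_cons_of_neg (by simpa using hch)]
        simp only [List.filter_nil]
        rw [if_neg (by simp)]
        simp [pvG, hk1]
    | inr hm1 =>
      -- at least two remaining rows
      have hrs : L.drop (k + 1) ≠ [] := by
        apply List.ne_nil_of_length_pos
        rw [List.length_drop]; omega
      have hcons : pvChanges L k (L.length - k)
          = if pvVi L k ≠ pvVi L (k - 1) then k :: pvChanges L (k + 1) (L.length - (k + 1))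
            else pvChanges L (k + 1) (L.length - (k + 1)) := by
        unfold pvChanges
        have hsp : L.length - k = (L.length - (k + 1)) + 1 := by omega
        rw [hsp, List.range'_succ]
        by_cases hch : pvVi L k ≠ pvVi L (k - 1)
        · rw [List.filter_cons_of_pos (by simpa using hch), if_pos hch]
        · rw [List.filter_cons_of_neg (by simpa using hch), if_neg hch]
      rw [hdrop]
      by_cases hch : pvVi L k ≠ pvVi L (k - 1)
      · -- cut at k
        have hfire : pvSegA x (pvVi L (k - 1)) (L.getD k [] :: L.drop (k + 1))
            = [pvVi L (k - 1), x, pvCi L k] :: pvSegA (pvCi L k) (pvVi L k) (L.drop (k + 1)) := by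
          unfold pvVi at hch
          unfold pvVi pvCi
          simp only [pvSegA]
          rw [if_pos (Or.inl hch)]
        rw [hfire]
        have hIH := ih (k + 1) hm1 (by omega) (by omega) (pvCi L k)
        have hkk : pvVi L ((k + 1) - 1) = pvVi L k := by norm_num
        rw [hkk] at hIH
        rw [hIH]
        -- pvCutsFrom L k = k :: pvCutsFrom L (k+1)
        have hcuts : pvCutsFrom L k = k :: pvCutsFrom L (k + 1) := by
          unfold pvCutsFrom
          rw [hcons, if_pos hch]
          by_cases hne : pvChanges L (k + 1) (L.length - (k + 1)) = []
          · rw [hne]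
            have h1 : ([k] : List Nat).getLast? = some k := rfl
            have h2 : ([] : List Nat).getLast? = none := rfl
            rw [h1, h2]
            rw [if_neg (by simp; omega), if_neg (by simp)]
            rfl
          · have hlc : (k :: pvChanges L (k + 1) (L.length - (k + 1))).getLast?
                = (pvChanges L (k + 1) (L.length - (k + 1))).getLast? := by
              cases hx : pvChanges L (k + 1) (L.length - (k + 1)) with
              | nil => exact absurd hx hne
              | cons a t => rw [List.getLast?_cons_cons]
            rw [hlc]
            by_cases hj : (pvChanges L (k + 1) (L.length - (k + 1))).getLast? = some (L.length - 1)
            · rw [if_pos hj, if_pos hj]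
            · rw [if_neg hj, if_neg hj]
              rfl
        rw [hcuts]
        simp [pvG]
      · -- no cut at k: skip the row
        push_neg at hch
        have hskip : pvSegA x (pvVi L (k - 1)) (L.getD k [] :: L.drop (k + 1))
            = pvSegA x (pvVi L (k - 1)) (L.drop (k + 1)) := by
          unfold pvVi at hch
          simp only [pvSegA]
          rw [if_neg]
          unfold pvVi
          push_neg
          exact ⟨by simpa using hch, hrs⟩
        rw [hskip]
        have hkk : pvVi L (k - 1) = pvVi L ((k + 1) - 1) := by
          simpa using hch.symm
        rw [hkk]
        rw [ih (k + 1) hm1 (by omega) (by omega) x]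
        have hcuts : pvCutsFrom L k = pvCutsFrom L (k + 1) := by
          have hcons' : pvChanges L k (L.length - k) = pvChanges L (k + 1) (L.length - (k + 1)) := by
            rw [hcons, if_neg (not_not_intro hch)]
          unfold pvCutsFrom
          rw [hcons']
        rw [hcuts]

-- top: A's full segment list equals pvG over all cuts
theorem pvSegA_eq_pvG (L : List (List Int)) (h : L ≠ []) (x : Int) :
    pvSegA x (pvVi L 0) L = pvG L x (pvCutsFrom L 1) := by
  cases L with
  | nil => exact absurd rfl h
  | cons r rest =>
    cases rest with
    | nil =>
      have hC : pvCutsFrom [r] 1 = [0] := by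
        unfold pvCutsFrom pvChanges
        simp
      rw [hC]
      simp [pvSegA, pvG, pvVi, pvCi]
    | cons r2 rest2 =>
      have hskip : pvSegA x (pvVi (r :: r2 :: rest2) 0) (r :: r2 :: rest2)
          = pvSegA x (pvVi (r :: r2 :: rest2) 0) ((r :: r2 :: rest2).drop 1) := by
        simp only [pvSegA]
        rw [if_neg]
        · rfl
        · push_neg
          exact ⟨by simp [pvVi], by simp⟩
      rw [hskip]
      exact pvMainB (r :: r2 :: rest2) (r2 :: rest2).length 1 (by simp) (by omega)
        (by simp; omega) x

theorem pvPorts_eq (info_list : List (List Int)) (advertising : Int) (h : info_list ≠ []) :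
    get_index_for_game info_list advertising = get_index_for_game_alt info_list advertising := by
  -- A side
  have hA : get_index_for_game info_list advertising
      = (pvSegA (pvCi info_list 0) (pvVi info_list 0) info_list).filter
          (fun x_ => decide (PySem.List.pyGetD x_ 0 0 = advertising)) := by
    unfold get_index_for_game
    have hfold := pvFoldA_eq info_list [] (pvCi info_list 0) (pvVi info_list 0) []
    simp only [List.nil_append, List.length_nil, Nat.cast_zero] at hfold
    have hrow0 : PySem.List.pyGetD info_list 0 [] = info_list.getD 0 [] :=
      PySem.List.pyGetD_zero info_list []
    simp only [hrow0]
    show ((PySem.List.pyRange 0 (info_list.length : Int) 1).foldl (pvStepA info_list)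
        (pvCi info_list 0, pvVi info_list 0, [])).2.2.filter
        (fun x_ => decide (PySem.List.pyGetD x_ 0 0 = advertising)) = _
    rw [hfold, pvStateA_segs]
    rfl
  -- B side
  have hB : get_index_for_game_alt info_list advertising
      = (pvG info_list (pvCi info_list 0) (pvCutsFrom info_list 1)).filter
          (fun s => decide (PySem.List.pyGetD s 0 0 = advertising)) := by
    simp only [get_index_for_game_alt]
    rw [pvCuts0_eq info_list, pvCutsF_eq info_list h]
    have h0 : (0 : Int) = ((0 : Nat) : Int) := rfl
    rw [show (([] : List (List Int)), (0 : Int)) = (([] : List (List Int)), ((0 : Nat) : Int)) from rfl]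
    rw [pvFoldB_eq info_list (pvCutsFrom info_list 1) [] 0]
    rfl
  rw [hA, hB, pvSegA_eq_pvG info_list h (pvCi info_list 0)]

-- ===== VERDICT (by name: the statement is the Claim_ definition above) =====
theorem get_index_for_game_spec : Claim_equal_get_index_for_game := by
  intro info_list advertising _ hpre
  unfold Spec_get_index_for_game
  exact pvPorts_eq info_list advertising hpre.1
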